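-- pv_equiv track=rewrite | github.com/NorbertMagyar/algogen | algogen.py | find_codon_periodic
-- ===== SOURCE A (Python) =====
-- def find_codon_periodic(genome: str, codon: str, start_index: int) -> int:
--     n = len(genome)
--     m = len(codon)
--     if n == 0 or m == 0 or m > n:
--         return -1
--
--     start = start_index % n
--     for k in range(n):
--         idx = (start + k) % n
--         if all(genome[(idx + j) % n] == codon[j] for j in range(m)):
--             return idx
--     return -1
-- ===== SOURCE B (Python) =====
-- def find_codon_periodic(genome: str, codon: str, start_index: int) -> int:
--     n = len(genome)
--     m = len(codon)
--     if n == 0 or m == 0 or m > n: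
--         return -1
--
--     start = start_index % n
--     rotated = genome[start:] + genome[:start]
--     p = (rotated + rotated[:m - 1]).find(codon)
--     return -1 if p == -1 else (start + p) % n
-- ===== Notes on version B (the rewrite author's own statement) =====
-- stated objective: faster
-- what changed: Replaces A's nested scan that re-checks the whole codon at every circular offset by a single substring search (str.find, two-way algorithm) over the genome rotated to start_index and extended by m-1 wrap characters, mapping the first hit back to a circular index.
import Mathlib
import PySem

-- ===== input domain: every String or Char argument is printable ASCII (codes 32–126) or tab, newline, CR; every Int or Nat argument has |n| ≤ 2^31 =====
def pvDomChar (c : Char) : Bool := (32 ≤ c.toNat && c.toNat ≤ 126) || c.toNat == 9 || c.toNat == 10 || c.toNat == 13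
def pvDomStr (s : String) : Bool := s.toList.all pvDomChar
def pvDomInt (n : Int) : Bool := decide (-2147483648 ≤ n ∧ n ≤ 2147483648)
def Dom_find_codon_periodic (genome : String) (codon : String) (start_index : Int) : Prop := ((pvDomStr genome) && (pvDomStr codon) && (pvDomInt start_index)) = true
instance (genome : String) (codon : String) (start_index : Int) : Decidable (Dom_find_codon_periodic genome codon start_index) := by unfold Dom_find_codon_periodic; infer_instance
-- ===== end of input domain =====

-- B replaces A's O(n*m) scan of every circular offset by one substring search on the
-- genome rotated to start_index and extended by m-1 wrap characters (objective: faster).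

-- ===== PORT A =====
def find_codon_periodic (genome : String) (codon : String) (start_index : Int) : Int :=
  let g := genome.toList
  let cd := codon.toList
  let n : Int := PySem.List.len g
  let m : Int := PySem.List.len cd
  if n = 0 ∨ m = 0 ∨ n < m then -1
  else
    let start := PySem.Int.mod start_index n
    match (PySem.List.pyRange 0 n 1).find? (fun k =>
        let idx := PySem.Int.mod (start + k) n
        (PySem.List.pyRange 0 m 1).all (fun j =>
          PySem.List.pyGet? g (PySem.Int.mod (idx + j) n) == PySem.List.pyGet? cd j)) with
    | some k => PySem.Int.mod (start + k) n
    | none => -1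

-- ===== PORT B =====
def find_codon_periodic_alt (genome : String) (codon : String) (start_index : Int) : Int :=
  let g := genome.toList
  let cd := codon.toList
  let n : Int := PySem.List.len g
  let m : Int := PySem.List.len cd
  if n = 0 ∨ m = 0 ∨ n < m then -1
  else
    let start := PySem.Int.mod start_index n
    let rotated := PySem.List.slice g (some start) none ++ PySem.List.slice g none (some start)
    let p := PySem.Chars.find (rotated ++ PySem.List.slice rotated none (some (m - 1))) cd
    if p = -1 then -1 else PySem.Int.mod (start + p) n

-- ===== PRECONDITION & SPEC =====
def Spec_find_codon_periodic (genome : String) (codon : String) (start_index : Int) (out : Int) : Prop := out = find_codon_periodic_alt genome codon start_index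
instance (genome : String) (codon : String) (start_index : Int) (out : Int) : Decidable (Spec_find_codon_periodic genome codon start_index out) := by unfold Spec_find_codon_periodic; infer_instance

-- ===== CLAIM (what is proved, stated in full; the proofs are below) =====
def Claim_equal_find_codon_periodic : Prop := ∀ (genome : String) (codon : String) (start_index : Int), Dom_find_codon_periodic genome codon start_index → Spec_find_codon_periodic genome codon start_index (find_codon_periodic genome codon start_index)

-- ===== LEMMAS AND PROOFS =====

-- find? returns the element at the first index where the predicate holds
theorem find?_first {α : Type} (p : α → Bool) (l : List α) (k : Nat) (hk : k < l.length)
    (hP : p (l[k]'hk) = true) (hmin : ∀ i (h : i < k), p (l[i]'(by omega)) = false) :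
    l.find? p = some (l[k]'hk) := by
  induction l generalizing k with
  | nil => simp at hk
  | cons a l ih =>
    cases k with
    | zero => exact List.find?_cons_of_pos hP
    | succ k =>
      have h0 : p a = false := hmin 0 (by omega)
      rw [List.find?_cons_of_neg (by simp [h0])]
      exact ih k (by simpa using hk) hP (fun i h => hmin (i + 1) (by omega))

-- find? over range(0, n) returns the first k satisfying the predicate
theorem find?_pyRange_zero (P : Int → Bool) (n : Int) (k : Nat) (hk : (k : Int) < n)
    (hP : P (k : Int) = true) (hmin : ∀ i : Nat, i < k → P (i : Int) = false) :
    (PySem.List.pyRange 0 n 1).find? P = some (k : Int) := by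
  rw [PySem.List.pyRange_one, List.find?_map]
  have hk' : k < (List.range (n - 0).toNat).length := by simp; omega
  rw [find?_first (P ∘ fun k : Nat => ((0 : Int) + k)) _ k hk'
    (by simpa using hP)
    (fun i h => by simpa using hmin i h)]
  simp

-- characters of the rotated-and-extended genome, read circularly
theorem rot_ext_getElem? (g : List Char) (s e i : Nat) (hs : s < g.length)
    (hi : i < g.length + e) (he : e ≤ g.length) :
    ((g.drop s ++ g.take s) ++ (g.drop s ++ g.take s).take e)[i]? = g[(s + i) % g.length]? := by
  have hN : 0 < g.length := by omega
  have hrotlen : (g.drop s ++ g.take s).length = g.length := by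
    simp; omega
  have rot : ∀ j, j < g.length → (g.drop s ++ g.take s)[j]? = g[(s + j) % g.length]? := by
    intro j hj
    by_cases hcase : j < g.length - s
    · rw [List.getElem?_append_left (by simpa using hcase), List.getElem?_drop,
        Nat.mod_eq_of_lt (by omega)]
    · rw [List.getElem?_append_right (by simpa using hcase),
        List.getElem?_take_of_lt (by simp; omega)]
      have : (s + j) % g.length = j - (g.drop s).length := by
        simp only [List.length_drop]
        have : s + j = (j - (g.length - s)) + 1 * g.length := by omega
        rw [this, Nat.add_mul_mod_self_right, Nat.mod_eq_of_lt (by omega)]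
      rw [this]
  by_cases hcase : i < g.length
  · rw [List.getElem?_append_left (by omega : i < (g.drop s ++ g.take s).length), rot i hcase]
  · rw [List.getElem?_append_right (by omega : (g.drop s ++ g.take s).length ≤ i),
      List.getElem?_take_of_lt (by simp [hrotlen]; omega), rot _ (by omega)]
    congr 1
    simp only [hrotlen]
    have h1 : s + i = (s + (i - g.length)) + 1 * g.length := by omega
    rw [h1, Nat.add_mul_mod_self_right]

-- the circular all-match condition at offset k equals "codon is a prefix of the extension dropped at k"
theorem prefix_iff_pointwise (cd t : List Char) (k : Nat) :
    cd <+: t.drop k ↔ ∀ j, j < cd.length → t[k + j]? = cd[j]? := by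
  rw [List.prefix_iff_eq_take]
  constructor
  · intro h j hj
    have : cd[j]? = ((t.drop k).take cd.length)[j]? := by rw [← h]
    rw [this, List.getElem?_take_of_lt hj, List.getElem?_drop]
  · intro h
    apply List.ext_getElem?
    intro j
    by_cases hj : j < cd.length
    · rw [List.getElem?_take_of_lt hj, List.getElem?_drop, h j hj]
    · rw [List.getElem?_eq_none (by omega), List.getElem?_eq_none (by simp; omega)]

-- combine the two Python '%' reductions into one Nat mod
theorem mod_mod_natCast (s k j N : Nat) :
    PySem.Int.mod (PySem.Int.mod ((s : Int) + (k : Int)) (N : Int) + (j : Int)) (N : Int)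
      = (((s + k + j) % N : Nat) : Int) := by
  have h1 : ((s : Int) + (k : Int)) = ((s + k : Nat) : Int) := by push_cast; ring
  rw [h1, PySem.Int.mod_natCast]
  have h2 : ((((s + k) % N : Nat) : Int) + (j : Int)) = ((((s + k) % N + j : Nat)) : Int) := by
    push_cast; ring
  rw [h2, PySem.Int.mod_natCast, Nat.mod_add_mod]

-- ===== VERDICT (by name: the statement is the Claim_ definition above) =====
theorem find_codon_periodic_spec : Claim_equal_find_codon_periodic := by
  intro genome codon start_index _
  unfold Spec_find_codon_periodic find_codon_periodic find_codon_periodic_alt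
  set g := genome.toList with hg
  set cd := codon.toList with hc
  simp only [PySem.List.len_eq]
  by_cases hguard : (g.length : Int) = 0 ∨ (cd.length : Int) = 0 ∨ (g.length : Int) < (cd.length : Int)
  · rw [if_pos hguard, if_pos hguard]
  · rw [if_neg hguard, if_neg hguard]
    push Not at hguard
    obtain ⟨hg0, hc0, hMN0⟩ := hguard
    have hN : 0 < g.length := by omega
    have hM : 0 < cd.length := by omega
    have hMN' : cd.length ≤ g.length := by exact_mod_cast hMN0
    set N := g.length with hNdef
    set M := cd.length with hMdef
    -- start is a Nat below N
    have hstart_nonneg : 0 ≤ PySem.Int.mod start_index (N : Int) :=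
      PySem.Int.mod_nonneg _ (by exact_mod_cast hN)
    have hstart_lt : PySem.Int.mod start_index (N : Int) < (N : Int) :=
      PySem.Int.mod_lt _ (by exact_mod_cast hN)
    set s := (PySem.Int.mod start_index (N : Int)).toNat with hsdef
    have hscast : PySem.Int.mod start_index (N : Int) = (s : Int) := by omega
    have hsN : s < N := by omega
    rw [hscast]
    -- the rotated + extended text
    rw [PySem.List.slice_from_natCast, PySem.List.slice_to_natCast]
    have hm1 : (M : Int) - 1 = ((M - 1 : Nat) : Int) := by omega
    rw [hm1, PySem.List.slice_to_natCast]
    set t := (g.drop s ++ g.take s) ++ (g.drop s ++ g.take s).take (M - 1) with htdef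
    have htlen : t.length = N + (M - 1) := by
      rw [htdef]; simp; omega
    have htchar : ∀ i, i < N + (M - 1) → t[i]? = g[(s + i) % N]? :=
      fun i hi => rot_ext_getElem? g s (M - 1) i hsN hi (by omega)
    -- pointwise form of the circular match at offset k < N
    have hmatch : ∀ k : Nat, k < N →
        ((cd <+: t.drop k) ↔ ∀ j, j < M → g[(s + k + j) % N]? = cd[j]?) := by
      intro k hk
      rw [prefix_iff_pointwise cd t k]
      constructor
      · intro h j hj
        rw [← h j hj, htchar (k + j) (by omega), ← Nat.add_assoc]
      · intro h j hj
        rw [htchar (k + j) (by omega), ← Nat.add_assoc]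
        exact h j hj
    -- A's predicate at offset k equals the pointwise condition
    have hpred : ∀ k : Nat, k < N →
        (((PySem.List.pyRange 0 (M : Int) 1).all (fun j =>
            PySem.List.pyGet? g (PySem.Int.mod (PySem.Int.mod ((s : Int) + (k : Int)) (N : Int) + j) (N : Int))
              == PySem.List.pyGet? cd j)) = true ↔ ∀ j, j < M → g[(s + k + j) % N]? = cd[j]?) := by
      intro k hk
      rw [List.all_eq_true]
      constructor
      · intro h j hj
        have hmem : (j : Int) ∈ PySem.List.pyRange 0 (M : Int) 1 := by
          rw [PySem.List.mem_pyRange_one]; omega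
        have := h _ hmem
        rw [mod_mod_natCast, PySem.List.pyGet?_natCast, PySem.List.pyGet?_natCast] at this
        simpa using this
      · intro h x hx
        rw [PySem.List.mem_pyRange_one] at hx
        obtain ⟨hx0, hxM⟩ := hx
        have hxcast : x = ((x.toNat : Nat) : Int) := by omega
        rw [hxcast, mod_mod_natCast, PySem.List.pyGet?_natCast, PySem.List.pyGet?_natCast]
        simpa using h x.toNat (by omega)
    -- case on B's find
    set p := PySem.Chars.find t cd with hpdef
    by_cases hfind : p = -1
    · -- no circular match anywhere: A's find? is none too
      rw [if_pos hfind]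
      have hnoinfix : ¬ cd <:+: t := by
        rw [← PySem.Chars.find_eq_neg_one_iff]; exact hfind
      have hnone : (PySem.List.pyRange 0 (N : Int) 1).find? (fun k =>
          (PySem.List.pyRange 0 (M : Int) 1).all (fun j =>
            PySem.List.pyGet? g (PySem.Int.mod (PySem.Int.mod ((s : Int) + k) (N : Int) + j) (N : Int))
              == PySem.List.pyGet? cd j)) = none := by
        rw [List.find?_eq_none]
        intro x hx
        rw [PySem.List.mem_pyRange_one] at hx
        obtain ⟨hx0, hxN⟩ := hx
        have hxcast : x = ((x.toNat : Nat) : Int) := by omega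
        intro habs
        rw [hxcast] at habs
        have := (hpred x.toNat (by omega)).mp habs
        have hpre : cd <+: t.drop x.toNat := (hmatch x.toNat (by omega)).mpr this
        exact hnoinfix ((PySem.Chars.isIn_iff_infix _ _).mp ((PySem.Chars.exists_prefix_drop_iff_isIn _ _).mp ⟨x.toNat, hpre⟩))
      rw [hnone]
    · -- first match at p: A's find? returns the same offset
      rw [if_neg hfind]
      have hp0 : 0 ≤ p := by
        have := PySem.Chars.neg_one_le_find t cd
        omega
      obtain ⟨hpre, hmin⟩ := PySem.Chars.find_spec (s := t) (sub := cd) (by rw [← hpdef]; exact hp0)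
      rw [← hpdef] at hpre hmin
      have hplen : p.toNat + M ≤ t.length := by
        have := hpre.length_le
        simp only [List.length_drop] at this
        omega
      have hpN : p.toNat < N := by omega
      have hfound : (PySem.List.pyRange 0 (N : Int) 1).find? (fun k =>
          (PySem.List.pyRange 0 (M : Int) 1).all (fun j =>
            PySem.List.pyGet? g (PySem.Int.mod (PySem.Int.mod ((s : Int) + k) (N : Int) + j) (N : Int))
              == PySem.List.pyGet? cd j)) = some ((p.toNat : Nat) : Int) := by
        apply find?_pyRange_zero _ _ p.toNat (by omega)
        · exact (hpred p.toNat hpN).mpr ((hmatch p.toNat hpN).mp hpre)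
        · intro i hi
          by_contra habs
          rw [Bool.not_eq_false] at habs
          have := (hmatch i (by omega)).mpr ((hpred i (by omega)).mp habs)
          exact hmin i (by omega) this
      rw [hfound]
      show PySem.Int.mod ((s : Int) + (p.toNat : Int)) (N : Int) = PySem.Int.mod ((s : Int) + p) (N : Int)
      congr 1
      omega
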